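-- pv_equiv track=rewrite | github.com/iceout/aidd-plugin | skills/aidd-observability/runtime/tools_inventory.py | _group_consumers
-- ===== SOURCE A (Python) =====
-- def _consumer_type(rel_path: str) -> str:
--     if rel_path.startswith("agents/"):
--         return "agent"
--     if rel_path.startswith("skills/"):
--         return "skill"
--     if rel_path.startswith("hooks/"):
--         return "hook"
--     if rel_path.startswith("tests/"):
--         return "test"
--     if rel_path.startswith("templates/") or rel_path.startswith("docs/") or rel_path in {
--         "AGENTS.md",
--         "README.md",
--         "README.en.md",
--         "CONTRIBUTING.md",
--     }:
--         return "docs"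
--     if rel_path.startswith("tools/"):
--         return "redirect_wrapper" if rel_path.endswith(".sh") else "tool"
--     return "other"
--
-- def _group_consumers(consumers: list[str]) -> dict[str, list[str]]:
--     grouped: dict[str, list[str]] = {}
--     for rel_path in consumers:
--         ctype = _consumer_type(rel_path)
--         grouped.setdefault(ctype, []).append(rel_path)
--     for key in list(grouped):
--         grouped[key] = sorted(set(grouped[key]))
--     return dict(sorted(grouped.items()))
-- ===== SOURCE B (Python) =====
-- def _consumer_type(rel_path: str) -> str:
--     if rel_path.startswith("agents/"):
--         return "agent"
--     if rel_path.startswith("skills/"):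
--         return "skill"
--     if rel_path.startswith("hooks/"):
--         return "hook"
--     if rel_path.startswith("tests/"):
--         return "test"
--     if rel_path.startswith("templates/") or rel_path.startswith("docs/") or rel_path in {
--         "AGENTS.md",
--         "README.md",
--         "README.en.md",
--         "CONTRIBUTING.md",
--     }:
--         return "docs"
--     if rel_path.startswith("tools/"):
--         return "redirect_wrapper" if rel_path.endswith(".sh") else "tool"
--     return "other"
--
-- # The classifier can only ever return one of these 8 names; listed here already sorted.
-- _CATEGORIES = ("agent", "docs", "hook", "other", "redirect_wrapper", "skill", "test", "tool")
--
-- def _group_consumers(consumers: list[str]) -> dict[str, list[str]]: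
--     # category-major: one global sort+dedup of the input, then one filter per fixed category
--     unique = sorted(set(consumers))
--     result: dict[str, list[str]] = {}
--     for ctype in _CATEGORIES:
--         bucket = [p for p in unique if _consumer_type(p) == ctype]
--         if bucket:
--             result[ctype] = bucket
--     return result
-- ===== Notes on version B (the rewrite author's own statement) =====
-- stated objective: alternative
-- what changed: B is category-major: it sorts+dedups the input once, then iterates the fixed sorted tuple of the 8 possible category names, filtering the ordered input per category and keeping nonempty buckets, replacing A's path-major dict accumulation via setdefault, per-bucket sorted(set(...)) rewrite loop and final sorted(items) pass.
import Mathlib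
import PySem

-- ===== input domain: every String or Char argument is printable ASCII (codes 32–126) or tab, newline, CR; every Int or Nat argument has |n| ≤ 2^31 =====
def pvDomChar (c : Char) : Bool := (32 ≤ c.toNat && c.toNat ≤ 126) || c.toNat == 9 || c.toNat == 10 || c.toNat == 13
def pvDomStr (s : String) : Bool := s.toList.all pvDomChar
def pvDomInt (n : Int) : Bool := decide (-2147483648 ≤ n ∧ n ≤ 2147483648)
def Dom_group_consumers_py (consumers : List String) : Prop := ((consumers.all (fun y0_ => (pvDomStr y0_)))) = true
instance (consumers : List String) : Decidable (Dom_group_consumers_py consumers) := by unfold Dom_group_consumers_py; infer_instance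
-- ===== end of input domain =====

-- B is category-major: one global sort+dedup, then one filter per fixed sorted category name,
-- replacing A's path-major dict accumulation and per-bucket rewrite passes (objective: alternative).

-- ===== PORT A =====
-- shared helper: Python _consumer_type, used unchanged by both A and B
def consumerType (relPath : String) : String :=
  if PySem.Str.startswith relPath "agents/" then "agent"
  else if PySem.Str.startswith relPath "skills/" then "skill"
  else if PySem.Str.startswith relPath "hooks/" then "hook"
  else if PySem.Str.startswith relPath "tests/" then "test"
  else if PySem.Str.startswith relPath "templates/" || PySem.Str.startswith relPath "docs/"
      || PySem.Set.contains (PySem.Set.ofList ["AGENTS.md", "README.md", "README.en.md", "CONTRIBUTING.md"]) relPath then "docs"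
  else if PySem.Str.startswith relPath "tools/" then
    (if PySem.Str.endswith relPath ".sh" then "redirect_wrapper" else "tool")
  else "other"

def group_consumers_py (consumers : List String) : List (String × List String) :=
  -- for rel_path in consumers: grouped.setdefault(ctype, []).append(rel_path)
  let grouped := consumers.foldl
    (fun d rel => d.modify (consumerType rel) [] (fun v => v ++ [rel])) PySem.Dict.empty
  -- for key in list(grouped): grouped[key] = sorted(set(grouped[key]))
  let grouped2 := grouped.keys.foldl
    (fun d k => d.insert k (PySem.List.sorted (PySem.Set.ofList (d.getD k [])) (fun x => x))) grouped
  -- dict(sorted(grouped.items())): the items have distinct keys, so Python's tuple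
  -- comparison never reaches the second component — sorting by the key is exact here
  (PySem.Dict.ofList (PySem.List.sorted grouped2.items (fun p => p.1))).items

-- ===== PORT B =====
-- _CATEGORIES: the 8 names _consumer_type can return, listed sorted
def pvCategories : List String :=
  ["agent", "docs", "hook", "other", "redirect_wrapper", "skill", "test", "tool"]

def group_consumers_py_alt (consumers : List String) : List (String × List String) :=
  -- unique = sorted(set(consumers))
  let unique := PySem.List.sorted (PySem.Set.ofList consumers) (fun x => x)
  -- for ctype in _CATEGORIES: bucket = [p for p in unique if _consumer_type(p) == ctype]; if bucket: result[ctype] = bucket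
  (pvCategories.foldl
    (fun d ctype =>
      let bucket := unique.filter (fun p => consumerType p == ctype)
      if bucket.isEmpty then d else d.insert ctype bucket)
    PySem.Dict.empty).items

-- ===== PRECONDITION & SPEC =====
def Spec_group_consumers_py (consumers : List String) (out : List (String × List String)) : Prop := out = group_consumers_py_alt consumers
instance (consumers : List String) (out : List (String × List String)) : Decidable (Spec_group_consumers_py consumers out) := by unfold Spec_group_consumers_py; infer_instance

-- ===== CLAIM (what is proved, stated in full; the proofs are below) =====
def Claim_equal_group_consumers_py : Prop := ∀ (consumers : List String), Dom_group_consumers_py consumers → Spec_group_consumers_py consumers (group_consumers_py consumers)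

-- ===== LEMMAS AND PROOFS =====

-- dict(pairs) with distinct keys is the association list itself
theorem items_ofList_of_nodup_fst {ps : List (String × List String)}
    (h : (ps.map (·.1)).Nodup) : (PySem.Dict.ofList ps).items = ps := by
  have := PySem.Dict.items_foldl_insert_fresh (ν := List String) ps (·.1) (·.2)
    PySem.Dict.empty (by intro a _; rfl) h
  simpa [PySem.Dict.ofList, PySem.Dict.update] using this

-- the grouping loop: value at key c is the subsequence of elements classified c
theorem getD_groupLoop (l : List String) (c : String) :
    (l.foldl (fun d rel => d.modify (consumerType rel) [] (fun v => v ++ [rel]))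
      (PySem.Dict.empty (κ := String) (ν := List String))).getD c []
      = l.filter (fun x => consumerType x == c) := by
  have hm : l.foldl (fun d rel => d.modify (consumerType rel) [] (fun v => v ++ [rel]))
      (PySem.Dict.empty (κ := String) (ν := List String))
      = (l.map (fun x => (consumerType x, x))).foldl
          (fun d p => d.modify p.1 [] (fun v => v ++ [p.2])) PySem.Dict.empty := by
    rw [List.foldl_map]
  rw [hm, PySem.Dict.getD_foldl_modify_append]
  simp [List.filter_map, Function.comp_def]

theorem keys_groupLoop (l : List String) :
    (l.foldl (fun d rel => d.modify (consumerType rel) [] (fun v => v ++ [rel]))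
      (PySem.Dict.empty (κ := String) (ν := List String))).keys
      = PySem.Set.ofList (l.map consumerType) := by
  rw [PySem.Dict.keys_foldl_modify_key l consumerType [] (fun _ rel v => v ++ [rel])]
  simp [PySem.Set.update_nil_left]

-- A's second loop, reading each key of the start dict once: getD of the result
theorem getD_rewriteLoop (g : List String → List String) :
    ∀ (ks : List String) (d : PySem.Dict String (List String)), ks.Nodup → ∀ c,
    (ks.foldl (fun e k => e.insert k (g (e.getD k []))) d).getD c []
      = if c ∈ ks then g (d.getD c []) else d.getD c [] := by
  intro ks
  induction ks with
  | nil => simp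
  | cons k ks ih =>
    intro d hnd c
    simp only [List.foldl_cons]
    rw [ih _ (List.Nodup.of_cons hnd) c]
    by_cases hc : c ∈ ks
    · have hck : c ≠ k := by rintro rfl; exact (List.nodup_cons.mp hnd).1 hc
      rw [PySem.Dict.getD_insert_of_ne _ _ _ hck]
      simp [hc]
    · by_cases hk : c = k
      · subst hk
        simp [hc]
      · simp [hc, hk, PySem.Dict.getD_insert]

theorem keys_rewriteLoop (g : List String → List String)
    (d : PySem.Dict String (List String)) :
    (d.keys.foldl (fun e k => e.insert k (g (e.getD k []))) d).keys = d.keys := by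
  rw [PySem.Dict.keys_foldl_insert d.keys (fun e k => g (e.getD k [])) d,
      PySem.Set.update_eq_append_filter]
  have : (PySem.Set.ofList d.keys).filter (fun y => !PySem.Set.contains d.keys y) = [] := by
    rw [List.filter_eq_nil_iff]
    intro a ha
    have : a ∈ d.keys := (PySem.Set.mem_ofList _ _).mp ha
    simp [this]
  rw [this, List.append_nil]

-- two strictly increasing lists with the same members are equal
theorem eq_of_mem_iff_pairwise_lt {xs ys : List String}
    (hx : xs.Pairwise (· < ·)) (hy : ys.Pairwise (· < ·))
    (hmem : ∀ a, a ∈ xs ↔ a ∈ ys) : xs = ys := by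
  have hnx : xs.Nodup := hx.imp (fun h => ne_of_lt h)
  have hny : ys.Nodup := hy.imp (fun h => ne_of_lt h)
  exact List.Perm.eq_of_pairwise (fun a b _ _ h1 h2 => absurd h2 (not_lt_of_gt h1)) hx hy
    ((List.perm_ext_iff_of_nodup hnx hny).mpr hmem)

-- canonical form for A's result
theorem canon_form (l : List String)
    (val : String → List String)
    (d2 : PySem.Dict String (List String))
    (hk2 : d2.keys = PySem.Set.ofList (l.map consumerType))
    (hnd2 : d2.keys.Nodup)
    (hget2 : ∀ c, c ∈ d2.keys → d2.getD c [] = val c) :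
    (PySem.Dict.ofList (PySem.List.sorted d2.items (fun p => p.1))).items
      = (PySem.List.sorted (PySem.Set.ofList (l.map consumerType)) (fun x => x)).map
          (fun k => (k, val k)) := by
  have hitems : d2.items = d2.keys.map (fun k => (k, d2.getD k [])) :=
    PySem.Dict.items_eq_map_keys d2 hnd2 []
  have hitems' : d2.items = d2.keys.map (fun k => (k, val k)) := by
    rw [hitems, List.map_congr_left]
    intro k hk
    rw [hget2 k hk]
  have hpair : (PySem.List.sorted (PySem.Set.ofList (l.map consumerType)) (fun x => x)).Pairwise (· < ·) :=
    PySem.List.sorted_ofList_pairwise_lt (l.map consumerType)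
  have hsorted : PySem.List.sorted d2.items (fun p => p.1)
      = (PySem.List.sorted (PySem.Set.ofList (l.map consumerType)) (fun x => x)).map
          (fun k => (k, val k)) := by
    apply PySem.List.sorted_eq_of_perm_of_pairwise_lt
    · rw [hitems', hk2]
      exact (PySem.List.sorted_perm _ _ _).map _
    · rw [List.pairwise_map]
      exact hpair
  rw [hsorted]
  apply items_ofList_of_nodup_fst
  rw [List.map_map]
  have : ((fun p => p.1) ∘ fun k => (k, val k)) = (id : String → String) := rfl
  rw [this, List.map_id]
  exact (hpair.imp (fun h => ne_of_lt h))

-- the globally sorted, duplicate-free input of B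
theorem ordered_nodup (consumers : List String) :
    (PySem.List.sorted (PySem.Set.ofList consumers) (fun x => x)).Nodup :=
  ((PySem.List.sorted_perm _ _ _).nodup_iff).mpr (PySem.Set.nodup_ofList consumers)

theorem ordered_mem (consumers : List String) (x : String) :
    x ∈ PySem.List.sorted (PySem.Set.ofList consumers) (fun x => x) ↔ x ∈ consumers := by
  rw [PySem.List.mem_sorted, PySem.Set.mem_ofList]

-- the classifier only returns names from pvCategories
theorem consumerType_mem_categories (r : String) : consumerType r ∈ pvCategories := by
  unfold consumerType pvCategories
  split_ifs <;> simp

theorem categories_pairwise : pvCategories.Pairwise (· < ·) := by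
  unfold pvCategories
  norm_num [String.lt_iff_toList_lt]
  decide

-- B's loop over the fixed category list: fresh-key inserts under a nonempty test
theorem items_catLoop (f : String → List String) :
    ∀ (cs : List String) (d : PySem.Dict String (List String)), cs.Nodup →
    (∀ c ∈ cs, d.contains c = false) →
    (cs.foldl (fun e c => if (f c).isEmpty then e else e.insert c (f c)) d).items
      = d.items ++ (cs.filter (fun c => !(f c).isEmpty)).map (fun c => (c, f c)) := by
  intro cs
  induction cs with
  | nil => simp
  | cons c cs ih =>
    intro d hnd hfresh
    simp only [List.foldl_cons, List.filter_cons]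
    by_cases he : (f c).isEmpty
    · rw [if_pos he, ih d (List.Nodup.of_cons hnd)
        (fun c' hc' => hfresh c' (List.mem_cons_of_mem _ hc'))]
      simp [he]
    · rw [if_neg he, ih (d.insert c (f c)) (List.Nodup.of_cons hnd)]
      · rw [PySem.Dict.items_insert_of_not_contains d (f c)
          (hfresh c (List.mem_cons_self))]
        simp [he]
      · intro c' hc'
        have hne : c' ≠ c := by
          rintro rfl; exact (List.nodup_cons.mp hnd).1 hc'
        rw [PySem.Dict.contains_insert]
        simp [hne, hfresh c' (List.mem_cons_of_mem _ hc')]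

-- ===== VERDICT (by name: the statement is the Claim_ definition above) =====
theorem group_consumers_py_spec : Claim_equal_group_consumers_py := by
  intro consumers _
  unfold Spec_group_consumers_py group_consumers_py group_consumers_py_alt
  set ordered := PySem.List.sorted (PySem.Set.ofList consumers) (fun x => x) with hord
  set groupedA := consumers.foldl
    (fun d rel => d.modify (consumerType rel) [] (fun v => v ++ [rel])) PySem.Dict.empty with hgA
  have hndA : groupedA.keys.Nodup := by
    rw [hgA, keys_groupLoop]; exact PySem.Set.nodup_ofList _
  -- A's value in canonical form
  have hA := canon_form consumers
    (fun c => PySem.List.sorted (PySem.Set.ofList (consumers.filter (fun x => consumerType x == c))) (fun x => x))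
    (groupedA.keys.foldl
      (fun d k => d.insert k (PySem.List.sorted (PySem.Set.ofList (d.getD k [])) (fun x => x))) groupedA)
    (by rw [keys_rewriteLoop (fun v => PySem.List.sorted (PySem.Set.ofList v) (fun x => x)) groupedA,
            hgA, keys_groupLoop])
    (by rw [keys_rewriteLoop (fun v => PySem.List.sorted (PySem.Set.ofList v) (fun x => x)) groupedA]
        exact hndA)
    (by intro c hc
        rw [keys_rewriteLoop (fun v => PySem.List.sorted (PySem.Set.ofList v) (fun x => x)) groupedA] at hc
        rw [getD_rewriteLoop (fun v => PySem.List.sorted (PySem.Set.ofList v) (fun x => x))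
              groupedA.keys groupedA hndA c]
        simp only [hc, if_pos]
        rw [hgA, getD_groupLoop])
  rw [hA]
  -- B's value in map-over-filter form
  have hB := items_catLoop (fun c => ordered.filter (fun p => consumerType p == c))
    pvCategories PySem.Dict.empty (categories_pairwise.imp (fun h => ne_of_lt h))
    (by intro c _; rfl)

  rw [hB]
  simp only [PySem.Dict.empty, List.nil_append]
  -- per-key values coincide
  have hval : ∀ k, PySem.List.sorted (PySem.Set.ofList (consumers.filter (fun x => consumerType x == k))) (fun x => x)
      = ordered.filter (fun x => consumerType x == k) := by
    intro k
    apply PySem.List.sorted_eq_of_perm_of_pairwise_lt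
    · apply (List.perm_ext_iff_of_nodup ((ordered_nodup consumers).filter _)
        (PySem.Set.nodup_ofList _)).mpr
      intro a
      simp only [List.mem_filter, PySem.Set.mem_ofList, ordered_mem consumers a]
    · exact (PySem.List.sorted_ofList_pairwise_lt consumers).filter _
  -- key lists coincide
  have hkeys : PySem.List.sorted (PySem.Set.ofList (consumers.map consumerType)) (fun x => x)
      = pvCategories.filter (fun c => !(ordered.filter (fun p => consumerType p == c)).isEmpty) := by
    apply eq_of_mem_iff_pairwise_lt (PySem.List.sorted_ofList_pairwise_lt _)
      (categories_pairwise.filter _)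
    intro a
    constructor
    · intro h
      rw [PySem.List.mem_sorted, PySem.Set.mem_ofList] at h
      obtain ⟨x, hx, rfl⟩ := List.mem_map.mp h
      rw [List.mem_filter]
      refine ⟨consumerType_mem_categories x, ?_⟩
      have hm : x ∈ ordered.filter (fun p => consumerType p == consumerType x) := by
        rw [List.mem_filter]
        exact ⟨(ordered_mem consumers x).mpr hx, by simp⟩
      simp [List.ne_nil_of_mem hm]
    · intro h
      obtain ⟨-, hne⟩ := List.mem_filter.mp h
      have hne' : ordered.filter (fun p => consumerType p == a) ≠ [] := by
        simpa using hne
      obtain ⟨x, hx⟩ := List.exists_mem_of_ne_nil _ hne'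
      obtain ⟨hx1, hx2⟩ := List.mem_filter.mp hx
      rw [PySem.List.mem_sorted, PySem.Set.mem_ofList]
      exact List.mem_map.mpr ⟨x, (ordered_mem consumers x).mp hx1, by simpa using hx2⟩
  rw [hkeys]
  apply List.map_congr_left
  intro k _
  exact congrArg (Prod.mk k) (hval k)
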